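-- pv_equiv track=rewrite | github.com/jags14/Codeforces-724-Div2 | main.py | isNice
-- ===== SOURCE A (Python) =====
-- def isNice(array):
--     for i in range(len(array)):
--         for j in range(len(array)):
--             if i == j:
--                 continue
--             diff = abs(array[i] - array[j])
--             if diff in array:
--                 continue
--             else:
--                 return False
--
--     return True
-- ===== SOURCE B (Python) =====
-- def isNice(array):
--     distinct = set(array)
--     if len(distinct) != len(array) and 0 not in distinct:
--         return False
--     vals = sorted(distinct)
--     for i in range(len(vals)):
--         for j in range(i + 1, len(vals)):
--             if vals[j] - vals[i] not in distinct:
--                 return False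
--     return True
-- ===== Notes on version B (the rewrite author's own statement) =====
-- stated objective: alternative
-- what changed: B dedups the array into a set, sorts the distinct values, reduces duplicates to a single rule (a repeated value forces 0 to be present), and checks only ordered differences vals[j]-vals[i] for i<j against the set, replacing A's |a[i]-a[j]| scan over all ordered index pairs with list membership inside.
import Mathlib
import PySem

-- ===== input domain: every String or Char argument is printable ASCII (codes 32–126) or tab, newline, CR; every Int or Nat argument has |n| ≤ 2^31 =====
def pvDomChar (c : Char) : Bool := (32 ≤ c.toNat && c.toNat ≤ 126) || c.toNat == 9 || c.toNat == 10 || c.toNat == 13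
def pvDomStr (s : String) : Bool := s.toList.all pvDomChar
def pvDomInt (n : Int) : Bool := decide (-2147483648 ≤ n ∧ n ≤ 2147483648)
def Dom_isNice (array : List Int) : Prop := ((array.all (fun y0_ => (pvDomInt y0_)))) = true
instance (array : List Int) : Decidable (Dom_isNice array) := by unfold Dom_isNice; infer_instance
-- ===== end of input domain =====

-- B dedups to the distinct values, sorts them, handles duplicates by a single 0-membership rule, and
-- checks only the ordered differences vals[j]-vals[i] (i<j) against the set; A scans all ordered index
-- pairs of the raw array testing |a[i]-a[j]| by list membership. Objective: alternative decomposition.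


-- ===== PORT A =====
-- inner 'for j in range(len(array))' loop: early 'return False' = stop with false
def isNiceInner (array : List Int) (i : Nat) : List Nat → Bool
  | [] => true
  | j :: js =>
    if i = j then isNiceInner array i js
    else
      let diff := |array.getD i 0 - array.getD j 0|   -- array[i], array[j]: i,j ∈ range(len), always in range
      if array.contains diff then isNiceInner array i js
      else false

-- outer 'for i in range(len(array))' loop
def isNiceOuter (array : List Int) : List Nat → Bool
  | [] => true
  | i :: is =>
    if isNiceInner array i (List.range array.length) then isNiceOuter array is
    else false

def isNice (array : List Int) : Bool :=
  isNiceOuter array (List.range array.length)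

-- ===== PORT B =====
-- inner 'for j in range(i + 1, len(vals))'
def isNiceAltInner (distinct : PySem.Set Int) (vals : List Int) (i : Nat) : List Nat → Bool
  | [] => true
  | j :: js =>
    if PySem.Set.contains distinct (vals.getD j 0 - vals.getD i 0) then
      isNiceAltInner distinct vals i js
    else false

-- outer 'for i in range(len(vals))'
def isNiceAltOuter (distinct : PySem.Set Int) (vals : List Int) : List Nat → Bool
  | [] => true
  | i :: is =>
    if isNiceAltInner distinct vals i (List.range' (i + 1) (vals.length - (i + 1))) then
      isNiceAltOuter distinct vals is
    else false

def isNice_alt (array : List Int) : Bool :=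
  let distinct : PySem.Set Int := PySem.Set.ofList array
  if PySem.Set.len distinct ≠ PySem.List.len array ∧ ¬ PySem.Set.contains distinct 0 then
    false
  else
    let vals := PySem.List.sorted distinct (fun x => x) false
    isNiceAltOuter distinct vals (List.range vals.length)

-- ===== PRECONDITION & SPEC =====
def Spec_isNice (array : List Int) (out : Bool) : Prop := out = isNice_alt array
instance (array : List Int) (out : Bool) : Decidable (Spec_isNice array out) := by unfold Spec_isNice; infer_instance

-- ===== CLAIM (what is proved, stated in full; the proofs are below) =====
def Claim_equal_isNice : Prop := ∀ (array : List Int), Dom_isNice array → Spec_isNice array (isNice array)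

-- ===== LEMMAS AND PROOFS =====

-- the common characterisation: all pairwise absolute differences at distinct positions occur in the array
def NiceProp (array : List Int) : Prop :=
  ∀ (k l : Nat) (hk : k < array.length) (hl : l < array.length),
    k ≠ l → |array[k] - array[l]| ∈ array

theorem isNiceInner_eq_all (array : List Int) (i : Nat) (js : List Nat) :
    isNiceInner array i js =
      js.all (fun j => decide (i = j) || array.contains |array.getD i 0 - array.getD j 0|) := by
  induction js with
  | nil => rfl
  | cons j js ih =>
    simp only [isNiceInner, List.all_cons]
    split_ifs with h1 h2 <;> simp_all

theorem isNiceOuter_eq_all (array : List Int) (is : List Nat) :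
    isNiceOuter array is = is.all (fun i => isNiceInner array i (List.range array.length)) := by
  induction is with
  | nil => rfl
  | cons i is ih =>
    simp only [isNiceOuter, List.all_cons]
    split_ifs with h <;> simp_all

theorem isNice_iff (array : List Int) : isNice array = true ↔ NiceProp array := by
  unfold isNice NiceProp
  rw [isNiceOuter_eq_all]
  simp only [List.all_eq_true, List.mem_range, isNiceInner_eq_all,
    Bool.or_eq_true, decide_eq_true_eq, List.contains_iff_mem]
  constructor
  · intro h k l hk hl hne
    rcases h k hk l hl with h' | h'
    · exact absurd h' hne
    · rwa [List.getD_eq_getElem array 0 hk, List.getD_eq_getElem array 0 hl] at h'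
  · intro h k hk l hl
    by_cases hkl : k = l
    · exact Or.inl hkl
    · refine Or.inr ?_
      rw [List.getD_eq_getElem array 0 hk, List.getD_eq_getElem array 0 hl]
      exact h k l hk hl hkl

-- abstract characterisation of B's condition, on the input alone
def NiceAltProp (array : List Int) : Prop :=
  (¬ array.Nodup → (0 : Int) ∈ array) ∧
  (∀ u ∈ array, ∀ v ∈ array, u < v → v - u ∈ array)

theorem isNiceAltInner_eq_all (distinct : PySem.Set Int) (vals : List Int) (i : Nat)
    (js : List Nat) :
    isNiceAltInner distinct vals i js =
      js.all (fun j => PySem.Set.contains distinct (vals.getD j 0 - vals.getD i 0)) := by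
  induction js with
  | nil => rfl
  | cons j js ih =>
    simp only [isNiceAltInner, List.all_cons]
    split_ifs with h <;> simp_all

theorem isNiceAltOuter_eq_all (distinct : PySem.Set Int) (vals : List Int) (is : List Nat) :
    isNiceAltOuter distinct vals is =
      is.all (fun i =>
        isNiceAltInner distinct vals i (List.range' (i + 1) (vals.length - (i + 1)))) := by
  induction is with
  | nil => rfl
  | cons i is ih =>
    simp only [isNiceAltOuter, List.all_cons]
    split_ifs with h <;> simp_all

-- length of set(xs) equals length of xs iff xs has no duplicates
theorem length_discard_eq (s : List Int) (x : Int) (hs : s.Nodup) :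
    (PySem.Set.discard s x).length = (s.erase x).length :=
  List.Perm.length_eq ((List.perm_ext_iff_of_nodup (PySem.Set.nodup_discard s x hs)
    (hs.erase x)).mpr (fun y => by
      rw [PySem.Set.mem_discard, hs.mem_erase_iff]; tauto))

theorem length_ofList_eq_iff (xs : List Int) :
    (PySem.Set.ofList xs).length = xs.length ↔ xs.Nodup := by
  induction xs with
  | nil => simp [PySem.Set.ofList]
  | cons x xs ih =>
    rw [PySem.Set.ofList_cons]
    by_cases hx : x ∈ xs
    · have hxS : x ∈ PySem.Set.ofList xs := (PySem.Set.mem_ofList ..).mpr hx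
      have h1 : (PySem.Set.discard (PySem.Set.ofList xs) x).length
          = (PySem.Set.ofList xs).length - 1 := by
        rw [length_discard_eq _ _ (PySem.Set.nodup_ofList xs),
          List.length_erase_of_mem hxS]
      have hle := PySem.Set.length_ofList_le xs
      have hpos : 0 < (PySem.Set.ofList xs).length := List.length_pos_of_mem hxS
      simp only [List.length_cons, h1, List.nodup_cons]
      constructor
      · intro h; omega
      · rintro ⟨h1', _⟩; exact absurd hx h1'
    · have hxS : x ∉ PySem.Set.ofList xs := fun h => hx ((PySem.Set.mem_ofList ..).mp h)
      have h1 : (PySem.Set.discard (PySem.Set.ofList xs) x).length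
          = (PySem.Set.ofList xs).length := by
        rw [length_discard_eq _ _ (PySem.Set.nodup_ofList xs),
          List.erase_of_not_mem hxS]
      simp only [List.length_cons, h1, List.nodup_cons]
      constructor
      · intro h; exact ⟨hx, ih.mp (by omega)⟩
      · rintro ⟨_, h2⟩; rw [ih.mpr h2]

theorem isNice_alt_iff (array : List Int) : isNice_alt array = true ↔ NiceAltProp array := by
  unfold isNice_alt NiceAltProp
  set S := PySem.Set.ofList array with hS
  set vals := PySem.List.sorted S (fun x => x) false with hvals
  have hmemS : ∀ y : Int, y ∈ S ↔ y ∈ array := fun y => PySem.Set.mem_ofList ..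
  have hmemv : ∀ y : Int, y ∈ vals ↔ y ∈ array := by
    intro y; rw [hvals, PySem.List.mem_sorted]; exact hmemS y
  have hpw : vals.Pairwise (· < ·) := PySem.List.sorted_ofList_pairwise_lt array
  have hdup : (PySem.Set.len S ≠ PySem.List.len array) ↔ ¬ array.Nodup := by
    rw [PySem.Set.len, PySem.List.len_eq, hS, Ne, Int.natCast_inj,
      length_ofList_eq_iff]
  have hC : ∀ x : Int, (PySem.Set.contains S x = true) ↔ x ∈ array :=
    fun x => (PySem.Set.contains_iff ..).trans (hmemS x)
  change (if PySem.Set.len S ≠ PySem.List.len array ∧ ¬ PySem.Set.contains S 0 = true then false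
      else isNiceAltOuter S vals (List.range vals.length)) = true ↔ _
  split_ifs with hguard
  · rw [false_iff]
    rintro ⟨h0, -⟩
    exact hguard.2 ((hC 0).mpr (h0 (hdup.mp hguard.1)))
  · rw [isNiceAltOuter_eq_all]
    simp only [List.all_eq_true, List.mem_range, isNiceAltInner_eq_all, List.mem_range',
      hC]
    constructor
    · intro h
      constructor
      · intro hnd
        rcases not_and_or.mp hguard with h1 | h1
        · exact absurd (hdup.mpr hnd) h1
        · exact (hC 0).mp (not_not.mp h1)
      · intro u hu v hv huv
        obtain ⟨i, hi, hvi⟩ := List.getElem_of_mem ((hmemv u).mpr hu)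
        obtain ⟨j, hj, hvj⟩ := List.getElem_of_mem ((hmemv v).mpr hv)
        have hij : i < j := by
          rcases Nat.lt_trichotomy i j with h' | h' | h'
          · exact h'
          · subst h'; rw [hvi] at hvj; omega
          · have := List.pairwise_iff_getElem.mp hpw j i hj hi h'
            rw [hvi, hvj] at this; omega
        have := h i hi j ⟨j - (i + 1), by omega, by omega⟩
        rw [List.getD_eq_getElem vals 0 hi, List.getD_eq_getElem vals 0 hj, hvi, hvj] at this
        exact this
    · rintro ⟨_, h⟩ i hi j hj
      obtain ⟨k, hk, rfl⟩ := hj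
      set j := i + 1 + k with hjdef
      have hj2 : j < vals.length := by omega
      simp only [one_mul]
      rw [List.getD_eq_getElem vals 0 hi, List.getD_eq_getElem vals 0 hj2]
      have hlt : vals[i] < vals[j] := List.pairwise_iff_getElem.mp hpw i j hi hj2 (by omega)
      exact h vals[i] ((hmemv _).mp (List.getElem_mem _)) vals[j] ((hmemv _).mp (List.getElem_mem _)) hlt

theorem nodup_iff_inj (array : List Int) :
    ¬ array.Nodup ↔ ∃ k l, ∃ (hk : k < array.length) (hl : l < array.length),
      k ≠ l ∧ array[k] = array[l] := by
  rw [List.nodup_iff_injective_getElem]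
  constructor
  · intro h
    simp only [Function.Injective, not_forall] at h
    obtain ⟨⟨k, hk⟩, ⟨l, hl⟩, heq, hne⟩ := h
    exact ⟨k, l, hk, hl, by simpa using hne, heq⟩
  · rintro ⟨k, l, hk, hl, hne, heq⟩ hinj
    exact hne (congrArg Fin.val (hinj (a₁ := ⟨k, hk⟩) (a₂ := ⟨l, hl⟩) heq))

theorem niceProp_iff_alt (array : List Int) : NiceProp array ↔ NiceAltProp array := by
  unfold NiceProp NiceAltProp
  constructor
  · intro h
    constructor
    · intro hnd
      obtain ⟨k, l, hk, hl, hne, heq⟩ := (nodup_iff_inj array).mp hnd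
      have := h k l hk hl hne
      rwa [heq, sub_self, abs_zero] at this
    · intro u hu v hv huv
      obtain ⟨k, hk, hak⟩ := List.getElem_of_mem hv
      obtain ⟨l, hl, hal⟩ := List.getElem_of_mem hu
      have hne : k ≠ l := fun he => by subst he; rw [hak] at hal; omega
      have := h k l hk hl hne
      rwa [hak, hal, abs_of_pos (by omega)] at this
  · rintro ⟨h0, hp⟩ k l hk hl hne
    rcases Int.lt_trichotomy array[k] array[l] with h' | h' | h'
    · rw [abs_of_neg (by omega)]
      have := hp array[k] (List.getElem_mem _) array[l] (List.getElem_mem _) h'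
      simpa [neg_sub] using this
    · rw [h', sub_self, abs_zero]
      exact h0 ((nodup_iff_inj array).mpr ⟨k, l, hk, hl, hne, h'⟩)
    · rw [abs_of_pos (by omega)]
      exact hp array[l] (List.getElem_mem _) array[k] (List.getElem_mem _) h'

-- ===== VERDICT (by name: the statement is the Claim_ definition above) =====
theorem isNice_spec : Claim_equal_isNice := by
  intro array _
  unfold Spec_isNice
  rw [Bool.eq_iff_iff, isNice_iff, isNice_alt_iff]
  exact niceProp_iff_alt array
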